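-- pv_equiv track=rewrite | github.com/Frederic-Barcelone/ese | corpus_metadata/document_metadata_extraction_disease.py | get_primary_id
-- ===== SOURCE A (Python) =====
-- from typing import Dict, List, Optional, Any, Union, Tuple, Set
--
-- PREFERRED_DISEASE_KEYS = ('ORPHA', 'DOID', 'UMLS', 'SNOMED', 'MONDO', 'MESH', 'OMIM', 'ICD10', 'ICD9')
--
-- def get_primary_id(normalized_ids: Dict[str, str]) -> Tuple[Optional[str], Optional[str]]:
--     """
--     Get the primary ID for a disease based on preferred order
--
--     Args:
--         normalized_ids: Dictionary of normalized IDs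
--
--     Returns:
--         Tuple of (id_type, id_value) or (None, None)
--     """
--     for key in PREFERRED_DISEASE_KEYS:
--         if key in normalized_ids and normalized_ids[key]:
--             return key, normalized_ids[key]
--
--     # Fallback to any available ID
--     for key, value in normalized_ids.items():
--         if value:
--             return key, value
--
--     return None, None
-- ===== SOURCE B (Python) =====
-- PREFERRED_DISEASE_KEYS = ('ORPHA', 'DOID', 'UMLS', 'SNOMED', 'MONDO', 'MESH', 'OMIM', 'ICD10', 'ICD9')
--
-- def get_primary_id(normalized_ids):
--     """Single pass over the dict: track the truthy entry with the smallest
--     (preference rank, insertion index); rank len(PREFERRED_DISEASE_KEYS) for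
--     non-preferred keys."""
--     rank = {k: i for i, k in enumerate(PREFERRED_DISEASE_KEYS)}
--     sentinel = len(PREFERRED_DISEASE_KEYS)
--     best = None  # (rank, index, key, value)
--     for i, (key, value) in enumerate(normalized_ids.items()):
--         if not value:
--             continue
--         r = rank.get(key, sentinel)
--         if best is None or (r, i) < (best[0], best[1]):
--             best = (r, i, key, value)
--     if best is None:
--         return None, None
--     return best[2], best[3]
-- ===== Notes on version B (the rewrite author's own statement) =====
-- stated objective: simpler
-- what changed: Replaced A's two sequential scans (a probe loop over the 9 preferred keys with dict lookups, then a fallback scan of the items) by a single pass over enumerate(items) that tracks the truthy entry with the smallest (preference rank, insertion index), using a rank dict built once; Pre_ only excludes association lists with duplicate keys, which cannot arise from a Python dict.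
import Mathlib
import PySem

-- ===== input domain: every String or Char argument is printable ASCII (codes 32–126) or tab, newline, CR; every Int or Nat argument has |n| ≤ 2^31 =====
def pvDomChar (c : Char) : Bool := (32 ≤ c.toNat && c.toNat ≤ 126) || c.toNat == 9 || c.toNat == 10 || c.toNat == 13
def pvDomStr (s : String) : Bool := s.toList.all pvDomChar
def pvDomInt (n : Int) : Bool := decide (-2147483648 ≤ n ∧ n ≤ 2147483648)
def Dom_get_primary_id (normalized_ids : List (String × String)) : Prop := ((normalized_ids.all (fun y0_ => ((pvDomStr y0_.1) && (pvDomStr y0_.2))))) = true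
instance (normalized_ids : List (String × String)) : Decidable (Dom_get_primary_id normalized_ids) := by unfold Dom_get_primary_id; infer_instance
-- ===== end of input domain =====

-- B replaces A's two sequential scans (preferred-key probe loop, then fallback items scan)
-- by one pass over the items tracking the best (rank, index) candidate; objective: simpler single pass.

-- ===== PORT A =====
def pvPrefKeys : List String :=
  ["ORPHA", "DOID", "UMLS", "SNOMED", "MONDO", "MESH", "OMIM", "ICD10", "ICD9"]

-- first loop of A: for key in PREFERRED_DISEASE_KEYS: if key in d and d[key]: return key, d[key]
def pvLoop1 (ks : List String) (d : PySem.Dict String String) : Option (String × String) :=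
  match ks with
  | [] => none
  | k :: rest =>
    match d.get? k with
    | some v => if v = "" then pvLoop1 rest d else some (k, v)
    | none => pvLoop1 rest d

-- second loop of A: for key, value in d.items(): if value: return key, value
def pvLoop2 (items : List (String × String)) : Option (String × String) :=
  match items with
  | [] => none
  | (k, v) :: rest => if v = "" then pvLoop2 rest else some (k, v)

def get_primary_id (normalized_ids : List (String × String)) : Option String × Option String :=
  let d := PySem.Dict.mk normalized_ids
  match pvLoop1 pvPrefKeys d with
  | some (k, v) => (some k, some v)
  | none =>
    match pvLoop2 d.items with
    | some (k, v) => (some k, some v)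
    | none => (none, none)

-- ===== PORT B =====
-- rank = {k: i for i, k in enumerate(PREFERRED_DISEASE_KEYS)}
def pvRank : PySem.Dict String Nat :=
  pvPrefKeys.zipIdx.foldl (fun d p => d.insert p.1 p.2) PySem.Dict.empty

-- enumerate(xs)
def pvEnum (n : Nat) : List (String × String) → List (Nat × (String × String))
  | [] => []
  | x :: xs => (n, x) :: pvEnum (n + 1) xs

-- loop body of B: skip falsy values, keep the lexicographically smallest (rank, index)
def pvStep (best : Option (Nat × Nat × String × String)) (p : Nat × (String × String)) :
    Option (Nat × Nat × String × String) :=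
  if p.2.2 = "" then best
  else
    let r := pvRank.getD p.2.1 pvPrefKeys.length
    match best with
    | none => some (r, p.1, p.2.1, p.2.2)
    | some b =>
      if r < b.1 ∨ (r = b.1 ∧ p.1 < b.2.1) then some (r, p.1, p.2.1, p.2.2) else some b

def get_primary_id_alt (normalized_ids : List (String × String)) : Option String × Option String :=
  match (pvEnum 0 normalized_ids).foldl pvStep none with
  | none => (none, none)
  | some b => (some b.2.2.1, some b.2.2.2)

-- ===== PRECONDITION & SPEC =====
-- Pre_ excludes association lists with duplicate keys: they cannot arise from a Python dict,
-- and on such lists A's first-match lookups and B's single pass make different accidental choices.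
def Pre_get_primary_id (normalized_ids : List (String × String)) : Prop :=
  (normalized_ids.map Prod.fst).Nodup
instance (normalized_ids : List (String × String)) : Decidable (Pre_get_primary_id normalized_ids) := by
  unfold Pre_get_primary_id; infer_instance

def pvWitness_get_primary_id : (List (String × String)) :=
  [("X", "a"), ("DOID", "d"), ("ORPHA", "")]

def Spec_get_primary_id (normalized_ids : List (String × String)) (out : Option String × Option String) : Prop := out = get_primary_id_alt normalized_ids
instance (normalized_ids : List (String × String)) (out : Option String × Option String) : Decidable (Spec_get_primary_id normalized_ids out) := by unfold Spec_get_primary_id; infer_instance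

-- ===== CLAIM (what is proved, stated in full; the proofs are below) =====
def Claim_equal_get_primary_id : Prop := ∀ (normalized_ids : List (String × String)), Dom_get_primary_id normalized_ids → Pre_get_primary_id normalized_ids → Spec_get_primary_id normalized_ids (get_primary_id normalized_ids)

-- ===== LEMMAS AND PROOFS =====

-- proof-only helpers: rank of a key, and a recursive "best candidate" selector
def pvRK (k : String) : Nat := pvRank.getD k pvPrefKeys.length

-- first truthy entry of minimal rank, as a right fold (rank, key, value)
def pvSel : List (String × String) → Option (Nat × String × String)
  | [] => none
  | (k, v) :: t =>
    let rest := pvSel t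
    if v = "" then rest
    else
      match rest with
      | none => some (pvRK k, k, v)
      | some s => if s.1 < pvRK k then some s else some (pvRK k, k, v)

def pvCombine : Option (Nat × String × String) → Option (Nat × String × String) →
    Option (Nat × String × String)
  | none, s => s
  | some b, none => some b
  | some b, some s => if s.1 < b.1 then some s else some b

theorem pvSel_cons_falsy (k : String) (t : List (String × String)) :
    pvSel ((k, "") :: t) = pvSel t := by
  simp [pvSel]

theorem pvSel_cons_truthy_none (k v : String) (t : List (String × String)) (hv : v ≠ "")
    (hrest : pvSel t = none) : pvSel ((k, v) :: t) = some (pvRK k, k, v) := by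
  simp [pvSel, hv, hrest]

theorem pvSel_cons_truthy_some (k v : String) (t : List (String × String)) (s : Nat × String × String)
    (hv : v ≠ "") (hrest : pvSel t = some s) :
    pvSel ((k, v) :: t) = if s.1 < pvRK k then some s else some (pvRK k, k, v) := by
  simp [pvSel, hv, hrest]

theorem pvSel_none_iff (l : List (String × String)) :
    pvSel l = none ↔ ∀ p ∈ l, p.2 = "" := by
  induction l with
  | nil => simp [pvSel]
  | cons p t ih =>
    obtain ⟨k, v⟩ := p
    by_cases hv : v = ""
    · subst hv
      rw [pvSel_cons_falsy]
      simp [ih]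
    · cases h : pvSel t with
      | none =>
        rw [pvSel_cons_truthy_none k v t hv h]
        simp only [reduceCtorEq, false_iff, not_forall]
        exact ⟨(k, v), List.mem_cons_self, hv⟩
      | some s =>
        rw [pvSel_cons_truthy_some k v t s hv h]
        constructor
        · intro hc
          split at hc <;> simp at hc
        · intro hall
          exact absurd (hall (k, v) List.mem_cons_self) hv

theorem pvSel_some (l : List (String × String)) (r : Nat) (k v : String)
    (h : pvSel l = some (r, k, v)) : (k, v) ∈ l ∧ v ≠ "" ∧ r = pvRK k := by
  induction l generalizing r k v with
  | nil => simp [pvSel] at h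
  | cons p t ih =>
    obtain ⟨k', v'⟩ := p
    by_cases hv : v' = ""
    · subst hv
      rw [pvSel_cons_falsy] at h
      obtain ⟨h1, h2, h3⟩ := ih r k v h
      exact ⟨List.mem_cons_of_mem _ h1, h2, h3⟩
    · cases hrest : pvSel t with
      | none =>
        rw [pvSel_cons_truthy_none k' v' t hv hrest] at h
        simp only [Option.some.injEq, Prod.mk.injEq] at h
        obtain ⟨rfl, rfl, rfl⟩ := h
        exact ⟨List.mem_cons_self, hv, rfl⟩
      | some s =>
        rw [pvSel_cons_truthy_some k' v' t s hv hrest] at h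
        by_cases hlt : s.1 < pvRK k'
        · rw [if_pos hlt] at h
          obtain ⟨s1, s2, s3⟩ := s
          simp only [Option.some.injEq, Prod.mk.injEq] at h
          obtain ⟨rfl, rfl, rfl⟩ := h
          obtain ⟨h1, h2, h3⟩ := ih _ _ _ hrest
          exact ⟨List.mem_cons_of_mem _ h1, h2, h3⟩
        · rw [if_neg hlt] at h
          simp only [Option.some.injEq, Prod.mk.injEq] at h
          obtain ⟨rfl, rfl, rfl⟩ := h
          exact ⟨List.mem_cons_self, hv, rfl⟩

theorem pvSel_min (l : List (String × String)) (s : Nat × String × String)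
    (h : pvSel l = some s) : ∀ p ∈ l, p.2 ≠ "" → s.1 ≤ pvRK p.1 := by
  induction l generalizing s with
  | nil => simp [pvSel] at h
  | cons p t ih =>
    obtain ⟨k', v'⟩ := p
    intro q hq hq2
    by_cases hv : v' = ""
    · subst hv
      rw [pvSel_cons_falsy] at h
      rcases List.mem_cons.mp hq with rfl | hq'
      · exact absurd rfl hq2
      · exact ih _ h q hq' hq2
    · cases hrest : pvSel t with
      | none =>
        rw [pvSel_cons_truthy_none k' v' t hv hrest] at h
        rcases List.mem_cons.mp hq with rfl | hq'
        · simp only [Option.some.injEq] at h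
          subst h
          exact Nat.le_refl _
        · exact absurd ((pvSel_none_iff t).mp hrest q hq') hq2
      | some s' =>
        rw [pvSel_cons_truthy_some k' v' t s' hv hrest] at h
        by_cases hlt : s'.1 < pvRK k'
        · rw [if_pos hlt] at h
          simp only [Option.some.injEq] at h
          subst h
          rcases List.mem_cons.mp hq with rfl | hq'
          · exact Nat.le_of_lt hlt
          · exact ih _ hrest q hq' hq2
        · rw [if_neg hlt] at h
          simp only [Option.some.injEq] at h
          subst h
          rcases List.mem_cons.mp hq with rfl | hq'
          · exact Nat.le_refl _
          · exact Nat.le_trans (Nat.le_of_not_lt hlt) (ih _ hrest q hq' hq2)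

theorem pvSel_all9 (l : List (String × String)) (h : ∀ p ∈ l, p.2 ≠ "" → pvRK p.1 = 9) :
    pvSel l = (pvLoop2 l).map (fun p => (9, p.1, p.2)) := by
  induction l with
  | nil => simp [pvSel, pvLoop2]
  | cons p t ih =>
    obtain ⟨k', v'⟩ := p
    have ht : ∀ q ∈ t, q.2 ≠ "" → pvRK q.1 = 9 := fun q hq => h q (List.mem_cons_of_mem _ hq)
    by_cases hv : v' = ""
    · subst hv
      rw [pvSel_cons_falsy, ih ht]
      simp [pvLoop2]
    · have h9 : pvRK k' = 9 := h (k', v') List.mem_cons_self hv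
      cases hrest : pvSel t with
      | none =>
        rw [pvSel_cons_truthy_none k' v' t hv hrest]
        simp [pvLoop2, hv, h9]
      | some s =>
        have hs1 : s.1 = 9 := by
          obtain ⟨s1, s2, s3⟩ := s
          obtain ⟨m1, m2, m3⟩ := pvSel_some t s1 s2 s3 hrest
          simpa [m3] using ht _ m1 m2
        rw [pvSel_cons_truthy_some k' v' t s hv hrest]
        simp [pvLoop2, hv, h9, hs1]

theorem pvLoop1_none (d : PySem.Dict String String) : ∀ ks, pvLoop1 ks d = none →
    ∀ k ∈ ks, ∀ v, d.get? k = some v → v = "" := by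
  intro ks
  induction ks with
  | nil => simp
  | cons k' rest ih =>
    intro h k hk v hv
    simp only [pvLoop1] at h
    rcases List.mem_cons.mp hk with rfl | hk'
    · rw [hv] at h
      dsimp only at h
      by_cases hz : v = ""
      · exact hz
      · simp [hz] at h
    · cases hg : d.get? k' with
      | none => rw [hg] at h; dsimp only at h; exact ih h k hk' v hv
      | some w =>
        rw [hg] at h
        dsimp only at h
        by_cases hz : w = ""
        · rw [if_pos hz] at h; exact ih h k hk' v hv
        · simp [hz] at h

theorem pvLoop1_some (d : PySem.Dict String String) (k₀ v₀ : String) :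
    ∀ ks, ks.Pairwise (fun a b => pvRK a ≤ pvRK b) → pvLoop1 ks d = some (k₀, v₀) →
    d.get? k₀ = some v₀ ∧ v₀ ≠ "" ∧ k₀ ∈ ks ∧
      ∀ k v, k ∈ ks → d.get? k = some v → v ≠ "" → pvRK k₀ ≤ pvRK k := by
  intro ks
  induction ks with
  | nil => simp [pvLoop1]
  | cons k' rest ih =>
    intro hpw h
    obtain ⟨hhead, htail⟩ := List.pairwise_cons.mp hpw
    simp only [pvLoop1] at h
    cases hg : d.get? k' with
    | none =>
      rw [hg] at h
      dsimp only at h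
      obtain ⟨h1, h2, h3, h4⟩ := ih htail h
      refine ⟨h1, h2, List.mem_cons_of_mem _ h3, ?_⟩
      intro k v hk hv hvne
      rcases List.mem_cons.mp hk with rfl | hk'
      · rw [hg] at hv; simp at hv
      · exact h4 k v hk' hv hvne
    | some w =>
      rw [hg] at h
      dsimp only at h
      by_cases hz : w = ""
      · rw [if_pos hz] at h
        obtain ⟨h1, h2, h3, h4⟩ := ih htail h
        refine ⟨h1, h2, List.mem_cons_of_mem _ h3, ?_⟩
        intro k v hk hv hvne
        rcases List.mem_cons.mp hk with rfl | hk'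
        · rw [hg] at hv
          injection hv with hv
          subst hv
          exact absurd hz hvne
        · exact h4 k v hk' hv hvne
      · rw [if_neg hz] at h
        simp only [Option.some.injEq, Prod.mk.injEq] at h
        obtain ⟨rfl, rfl⟩ := h
        refine ⟨hg, hz, List.mem_cons_self, ?_⟩
        intro k v hk _ _
        rcases List.mem_cons.mp hk with rfl | hk'
        · exact Nat.le_refl _
        · exact hhead k hk'

theorem pvRK_notin (k : String) (h : k ∉ pvPrefKeys) : pvRK k = 9 := by
  simp only [pvPrefKeys, List.mem_cons, List.not_mem_nil, or_false, not_or] at h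
  obtain ⟨h1, h2, h3, h4, h5, h6, h7, h8, h9⟩ := h
  simp [pvRK, pvRank, pvPrefKeys, List.zipIdx, PySem.Dict.getD_insert, h1, h2, h3, h4, h5, h6, h7, h8, h9]

theorem pv_fold_char (l : List (String × String)) : ∀ (n : Nat) (b : Option (Nat × Nat × String × String)),
    (∀ x, b = some x → x.2.1 < n) →
    ((pvEnum n l).foldl pvStep b).map (fun x => (x.1, x.2.2)) =
      pvCombine (b.map (fun x => (x.1, x.2.2))) (pvSel l) := by
  induction l with
  | nil =>
    intro n b hb
    cases b <;> simp [pvEnum, pvSel, pvCombine]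
  | cons p t ih =>
    obtain ⟨k, v⟩ := p
    intro n b hb
    simp only [pvEnum, List.foldl_cons]
    by_cases hv : v = ""
    · subst hv
      have hstep : pvStep b (n, (k, "")) = b := by simp [pvStep]
      rw [hstep, pvSel_cons_falsy]
      exact ih (n + 1) b (fun x hx => Nat.lt_succ_of_lt (hb x hx))
    · cases b with
      | none =>
        have hstep : pvStep none (n, (k, v)) = some (pvRK k, n, k, v) := by
          simp [pvStep, hv, pvRK]
        rw [hstep, ih (n + 1) _ (by intro x hx; cases hx; exact Nat.lt_succ_self n)]
        cases hrest : pvSel t with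
        | none =>
          rw [pvSel_cons_truthy_none k v t hv hrest]
          simp [pvCombine]
        | some s =>
          rw [pvSel_cons_truthy_some k v t s hv hrest]
          simp only [Option.map_some, Option.map_none, pvCombine]
      | some bb =>
        obtain ⟨br, bi, bk, bv⟩ := bb
        have hbi : bi < n := hb _ rfl
        by_cases hup : pvRK k < br
        · have hstep : pvStep (some (br, bi, bk, bv)) (n, (k, v)) = some (pvRK k, n, k, v) := by
            simp only [pvStep, if_neg hv]
            simp only [pvRK]
            split
            · rfl
            · rename_i hcond
              exact absurd (Or.inl hup) hcond
          rw [hstep, ih (n + 1) _ (by intro x hx; cases hx; exact Nat.lt_succ_self n)]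
          cases hrest : pvSel t with
          | none =>
            rw [pvSel_cons_truthy_none k v t hv hrest]
            simp [pvCombine, hup]
          | some s =>
            rw [pvSel_cons_truthy_some k v t s hv hrest]
            by_cases hlt : s.1 < pvRK k
            · simp [pvCombine, hlt, Nat.lt_trans hlt hup]
            · simp [pvCombine, hlt, hup]
        · have hstep : pvStep (some (br, bi, bk, bv)) (n, (k, v)) = some (br, bi, bk, bv) := by
            simp only [pvStep, if_neg hv]
            split
            · rename_i hcond
              rcases hcond with hc | ⟨hc1, hc2⟩
              · exact absurd hc hup
              · omega
            · rfl
          rw [hstep, ih (n + 1) _ (fun x hx => Nat.lt_succ_of_lt (hb x hx))]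
          cases hrest : pvSel t with
          | none =>
            rw [pvSel_cons_truthy_none k v t hv hrest]
            simp [pvCombine, hup]
          | some s =>
            rw [pvSel_cons_truthy_some k v t s hv hrest]
            by_cases hlt : s.1 < pvRK k
            · by_cases hlt2 : s.1 < br
              · simp [pvCombine, hlt, hlt2]
              · simp [pvCombine, hlt, hlt2]
            · have hge : ¬ s.1 < br := by omega
              simp [pvCombine, hlt, hge, hup]

theorem pv_alt_char (l : List (String × String)) :
    get_primary_id_alt l = match pvSel l with
      | none => (none, none)
      | some s => (some s.2.1, some s.2.2) := by
  have h := pv_fold_char l 0 none (by intro x hx; cases hx)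
  simp only [Option.map_none, pvCombine] at h
  unfold get_primary_id_alt
  cases hf : (pvEnum 0 l).foldl pvStep none with
  | none =>
    rw [hf] at h
    simp only [Option.map_none] at h
    rw [← h]
  | some b =>
    rw [hf] at h
    simp only [Option.map_some] at h
    rw [← h]

-- ===== VERDICT (by name: the statement is the Claim_ definition above) =====
theorem pvRK_pairwise : pvPrefKeys.Pairwise (fun a b => pvRK a ≤ pvRK b) := by decide

theorem pvRK_le_8 : ∀ x ∈ pvPrefKeys, pvRK x ≤ 8 := by decide

theorem pvRK_inj : ∀ a ∈ pvPrefKeys, ∀ b ∈ pvPrefKeys, pvRK a = pvRK b → a = b := by decide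

theorem get_primary_id_spec : Claim_equal_get_primary_id := by
  intro l _hdom hpre
  unfold Spec_get_primary_id
  have hitems : (PySem.Dict.mk l).items = l := rfl
  have hkeys : (PySem.Dict.mk l).keys.Nodup := by
    simpa [PySem.Dict.keys, hitems] using hpre
  rw [pv_alt_char l]
  simp only [get_primary_id]
  cases h1 : pvLoop1 pvPrefKeys (PySem.Dict.mk l) with
  | some p =>
    obtain ⟨k₀, v₀⟩ := p
    obtain ⟨hg, hvne, hk0mem, hmin⟩ := pvLoop1_some _ k₀ v₀ pvPrefKeys pvRK_pairwise h1
    have hmem0 : (k₀, v₀) ∈ l := by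
      have := PySem.Dict.mem_items_of_get?_eq_some _ hg
      rwa [hitems] at this
    cases hsel : pvSel l with
    | none =>
      exact absurd ((pvSel_none_iff l).mp hsel (k₀, v₀) hmem0) hvne
    | some s =>
      obtain ⟨r, k, v⟩ := s
      obtain ⟨hmem, hv, hr⟩ := pvSel_some l r k v hsel
      have hle : r ≤ pvRK k₀ := pvSel_min l _ hsel (k₀, v₀) hmem0 hvne
      have h8 : pvRK k₀ ≤ 8 := pvRK_le_8 k₀ hk0mem
      have hkpref : k ∈ pvPrefKeys := by
        by_contra hnk
        have := pvRK_notin k hnk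
        omega
      have hgk : (PySem.Dict.mk l).get? k = some v := by
        refine PySem.Dict.get?_of_mem_items _ ?_ hkeys
        rwa [hitems]
      have hge : pvRK k₀ ≤ pvRK k := hmin k v hkpref hgk hv
      have hkk : k = k₀ := pvRK_inj k hkpref k₀ hk0mem (by omega)
      subst hkk
      rw [hgk] at hg
      injection hg with hg
      subst hg
      rfl
  | none =>
    have hnone := pvLoop1_none _ pvPrefKeys h1
    have hall9 : ∀ p ∈ l, p.2 ≠ "" → pvRK p.1 = 9 := by
      intro p hp hpne
      by_contra h9
      have hpref : p.1 ∈ pvPrefKeys := by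
        by_contra hnp
        exact h9 (pvRK_notin _ hnp)
      have hg : (PySem.Dict.mk l).get? p.1 = some p.2 := by
        refine PySem.Dict.get?_of_mem_items _ ?_ hkeys
        rw [hitems]
        exact hp
      exact hpne (hnone p.1 hpref p.2 hg)
    rw [pvSel_all9 l hall9]
    cases h2 : pvLoop2 l with
    | none => rfl
    | some q => rfl
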